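-- pv_equiv track=rewrite | github.com/RIshimoto/AtCoder_myPractice | ARC/ARC140/arc140_a.py | solve
-- ===== SOURCE A (Python) =====
-- def solve(N, K, S):
--     from collections import defaultdict
--     ans = N
--     for k in range(1, N//2+1):
--         if N % k == 0:
--             l = 0
--             r = k
--             while r < N:
--                 l = r
--                 r += k
--             cnt = 0
--             for i in range(k):
--                 mp = defaultdict(lambda: 0)
--                 j = 0
--                 while i + j * k < N:
--                     mp[S[i+j*k]] += 1
--                     j += 1
--                 cnt += j - max(mp.values())
--             if cnt <= K:
--                 ans = min(k, ans)
--     return ans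
-- ===== SOURCE B (Python) =====
-- def period_cost(S, N, k):
--     # fold S into rows of width k and, per column, sort and measure the longest
--     # run of equal characters: changes needed = column length - longest run
--     chunks = [S[j:j + k] for j in range(0, N, k)]
--     changes = 0
--     for col in zip(*chunks):
--         srt = sorted(col)
--         best = run = 1
--         for a, b in zip(srt, srt[1:]):
--             run = run + 1 if a == b else 1
--             if run > best:
--                 best = run
--         changes += len(col) - best
--     return changes
--
--
-- def solve(N, K, S):
--     divs = []
--     i = 1
--     while i * i <= N:
--         if N % i == 0:
--             divs.append(i)
--             if i != N // i:
--                 divs.append(N // i)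
--         i += 1
--     for k in sorted(divs):
--         if 2 * k <= N and period_cost(S, N, k) <= K:
--             return k
--     return N
-- ===== Notes on version B (the rewrite author's own statement) =====
-- stated objective: alternative
-- what changed: B enumerates divisors by sqrt-pairing (i and N//i while i*i<=N) instead of scanning range(1,N//2+1), folds S into width-k rows and transposes them with zip instead of walking strides i,i+k,..., and replaces A's per-class frequency dict and max(mp.values()) by sorting each column and scanning for the longest run of equal characters, returning the first qualifying divisor in sorted order.
import Mathlib
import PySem

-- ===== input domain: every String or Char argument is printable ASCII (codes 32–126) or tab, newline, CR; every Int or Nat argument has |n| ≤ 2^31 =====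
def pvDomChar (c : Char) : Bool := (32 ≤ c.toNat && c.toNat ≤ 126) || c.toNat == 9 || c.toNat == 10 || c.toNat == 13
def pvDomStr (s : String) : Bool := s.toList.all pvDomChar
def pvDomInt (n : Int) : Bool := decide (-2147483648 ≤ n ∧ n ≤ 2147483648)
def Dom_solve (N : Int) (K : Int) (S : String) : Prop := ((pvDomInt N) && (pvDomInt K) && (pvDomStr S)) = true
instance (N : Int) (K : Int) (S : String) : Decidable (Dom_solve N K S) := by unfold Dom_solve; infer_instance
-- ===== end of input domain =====

-- B replaces A's range scan + per-residue counting dict by sqrt-paired divisor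
-- enumeration, folding S into width-k rows transposed with zip, and a
-- sort-and-longest-run scan per column; first qualifying divisor is returned.

-- termination measures cited by the ports' decreasing_by (small hand proofs)
lemma pvDecTo (N r k : Int) (h1 : r < N) (h2 : 0 < k) :
    (N - (r + k)).toNat < (N - r).toNat :=
  (Int.toNat_lt_toNat (sub_pos.mpr h1)).mpr (sub_lt_sub_left (lt_add_of_pos_right r h2) N)

lemma pvDecStride (N k i j : Int) (h1 : i + j * k < N) (h2 : 0 < k) :
    (N - (i + (j + 1) * k)).toNat < (N - (i + j * k)).toNat := by
  rw [add_mul, one_mul, ← add_assoc]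
  exact pvDecTo N (i + j * k) k h1 h2

lemma pvDecDiv (N i : Int) (h1 : i * i ≤ N) (h2 : 0 < i) :
    (N + 1 - (i + 1)).toNat < (N + 1 - i).toNat := by
  have hi : i ≤ i * i := le_mul_of_one_le_left (le_of_lt h2) h2
  exact (Int.toNat_lt_toNat (sub_pos.mpr (lt_of_le_of_lt (le_trans hi h1) (lt_add_one N)))).mpr
    (sub_lt_sub_left (lt_add_one i) (N + 1))

-- ===== PORT A =====
-- A's dead 'l = 0; r = k; while r < N: l = r; r += k' loop (its value is never used by A);
-- the '0 < k' conjunct is only a termination guard: every call site passes k ≥ 1.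
def solveDead (N k l r : Int) : Int × Int :=
  if h : r < N ∧ 0 < k then solveDead N k r (r + k) else (l, r)
termination_by (N - r).toNat
decreasing_by exact pvDecTo N r k h.1 h.2

-- A's inner 'while i + j * k < N: mp[S[i+j*k]] += 1; j += 1' loop, returning (j, mp).
-- S[i+j*k] is PySem.List.pyGetD with default ' ': the default is read exactly where Python
-- raises IndexError, and Pre_solve excludes those inputs.  '0 < k' is a termination guard only.
def solveClass (cs : List Char) (N k i j : Int) (mp : PySem.Dict Char Int) : Int × PySem.Dict Char Int :=
  if h : i + j * k < N ∧ 0 < k then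
    solveClass cs N k i (j + 1) (mp.modify (PySem.List.pyGetD cs (i + j * k) ' ') 0 (· + 1))
  else (j, mp)
termination_by (N - (i + j * k)).toNat
decreasing_by exact pvDecStride N k i j h.1 h.2

def solve (N : Int) (K : Int) (S : String) : Int :=
  (PySem.List.pyRange 1 (PySem.Int.floordiv N 2 + 1) 1).foldl (fun ans k =>
    if PySem.Int.mod N k == 0 then
      let _lr := solveDead N k 0 k
      let cnt := (PySem.List.pyRange 0 k 1).foldl (fun cnt i =>
        let jm := solveClass S.toList N k i 0 PySem.Dict.empty
        -- max(mp.values()): mp is never empty when A reaches this line (i < k ≤ N//2 < N),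
        -- so the '.getD 0' default of max? is never read.
        cnt + (jm.1 - (PySem.List.max? jm.2.values (fun v => v)).getD 0)) 0
      if cnt ≤ K then min k ans else ans
    else ans) N

-- ===== PORT B =====
-- zip(*chunks): columns while every row still has an element (Python zip stops at the
-- shortest row; here all rows are nonempty or the zip is over).
def pvZipT (rows : List (List Char)) : List (List Char) :=
  if h : rows ≠ [] ∧ ∀ r ∈ rows, r ≠ [] then
    (rows.map (fun r => r.headI)) :: pvZipT (rows.map (fun r => r.tail))
  else []
termination_by rows.headI.length
decreasing_by
  cases rows with
  | nil => exact absurd rfl h.1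
  | cons r0 rs =>
      have h0 : 0 < r0.length := List.length_pos_iff.mpr (h.2 r0 List.mem_cons_self)
      show r0.tail.length < r0.length
      rw [List.length_tail]
      exact Nat.sub_lt h0 one_pos

-- B's period_cost: rows S[j:j+k], transpose, sort each column, longest equal run.
def periodCost (cs : List Char) (N k : Int) : Int :=
  let chunks := (PySem.List.pyRange 0 N k).map
    (fun j => PySem.List.slice cs (some j) (some (j + k)))
  (pvZipT chunks).foldl (fun changes col =>
    let srt := PySem.List.sorted col (fun c => c) false
    let br := (srt.zip (PySem.List.slice srt (some 1) none)).foldl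
      (fun (p : Int × Int) ab =>
        let run := if ab.1 == ab.2 then p.2 + 1 else 1
        (if run > p.1 then run else p.1, run)) ((1 : Int), (1 : Int))
    changes + ((col.length : Int) - br.1)) 0

-- B's 'while i * i <= N: …; i += 1' divisor collection ('0 < i' is a termination guard only:
-- the call site starts at i = 1).
def divLoop (N i : Int) : List Int :=
  if h : i * i ≤ N ∧ 0 < i then
    (if PySem.Int.mod N i == 0 then
      i :: (if PySem.Int.floordiv N i != i then [PySem.Int.floordiv N i] else [])
    else []) ++ divLoop N (i + 1)
  else []
termination_by (N + 1 - i).toNat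
decreasing_by exact pvDecDiv N i h.1 h.2

-- B's 'for k in sorted(divs): if 2 * k <= N and period_cost(S, N, k) <= K: return k'.
def solveFindB (N K : Int) (cs : List Char) : List Int → Int
  | [] => N
  | k :: ks =>
      if 2 * k ≤ N ∧ periodCost cs N k ≤ K then k else solveFindB N K cs ks

def solve_alt (N : Int) (K : Int) (S : String) : Int :=
  solveFindB N K S.toList (PySem.List.sorted (divLoop N 1) (fun d => d) false)

-- ===== PRECONDITION & SPEC =====
-- Python A raises IndexError (S[i] with i up to N-1) exactly when 2 ≤ N and N > len(S);
-- Pre_solve admits every input on which A returns.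
def Pre_solve (N : Int) (K : Int) (S : String) : Prop := N ≤ 1 ∨ N ≤ (S.toList.length : Int)
instance (N : Int) (K : Int) (S : String) : Decidable (Pre_solve N K S) := by unfold Pre_solve; infer_instance
def pvWitness_solve : Int × Int × String := (4, 1, "abab")

def Spec_solve (N : Int) (K : Int) (S : String) (out : Int) : Prop := out = solve_alt N K S
instance (N : Int) (K : Int) (S : String) (out : Int) : Decidable (Spec_solve N K S out) := by unfold Spec_solve; infer_instance

-- ===== CLAIM (what is proved, stated in full; the proofs are below) =====
def Claim_equal_solve : Prop := ∀ (N : Int) (K : Int) (S : String), Dom_solve N K S → Pre_solve N K S → Spec_solve N K S (solve N K S)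


-- ===== LEMMAS AND PROOFS =====

-- proof-side: the list of positions i, i+k, i+2k, … below N that A's inner while loop visits
def pvAIdx (N k i j : Int) : List Int :=
  if h : i + j * k < N ∧ 0 < k then (i + j * k) :: pvAIdx N k i (j + 1) else []
termination_by (N - (i + j * k)).toNat
decreasing_by exact pvDecStride N k i j h.1 h.2

lemma pvAIdx_pos {N k i j : Int} (h : i + j * k < N ∧ 0 < k) :
    pvAIdx N k i j = (i + j * k) :: pvAIdx N k i (j + 1) := by
  rw [pvAIdx]
  exact dif_pos h

lemma pvAIdx_neg {N k i j : Int} (h : ¬ (i + j * k < N ∧ 0 < k)) :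
    pvAIdx N k i j = [] := by
  rw [pvAIdx]
  exact dif_neg h

lemma solveClass_eq (cs : List Char) (N k i j : Int) (mp : PySem.Dict Char Int) :
    solveClass cs N k i j mp =
      (j + ((pvAIdx N k i j).length : Int),
       (pvAIdx N k i j).foldl (fun d x => d.modify (PySem.List.pyGetD cs x ' ') 0 (· + 1)) mp) := by
  fun_induction solveClass cs N k i j mp with
  | case1 j mp h ih =>
      rw [ih, pvAIdx_pos h]
      simp only [List.length_cons, List.foldl_cons, Prod.mk.injEq, and_true]
      push_cast
      ring
  | case2 j mp h =>
      rw [pvAIdx_neg h]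
      simp

lemma mem_pvAIdx {N k i : Int} (j x : Int) :
    x ∈ pvAIdx N k i j ↔ x < N ∧ 0 < k ∧ ∃ j' : Int, j ≤ j' ∧ x = i + j' * k := by
  fun_induction pvAIdx N k i j with
  | case1 j h ih =>
      simp only [List.mem_cons, ih]
      constructor
      · rintro (rfl | ⟨hx, hk, j', hj, rfl⟩)
        · exact ⟨h.1, h.2, j, le_refl _, rfl⟩
        · exact ⟨hx, hk, j', by omega, rfl⟩
      · rintro ⟨hx, hk, j', hj, rfl⟩
        rcases eq_or_lt_of_le hj with rfl | hlt
        · exact Or.inl rfl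
        · exact Or.inr ⟨hx, hk, j', by omega, rfl⟩
  | case2 j h =>
      simp only [List.not_mem_nil, false_iff, not_and]
      intro hx hk
      rintro ⟨j', hj, he⟩
      have h1 : ¬ (i + j * k < N) := fun hlt => h ⟨hlt, hk⟩
      have e : i + j' * k = i + j * k + (j' - j) * k := by ring
      have h0 : 0 ≤ (j' - j) * k := mul_nonneg (by omega) (by omega)
      omega

lemma pairwise_pvAIdx (N k i j : Int) : (pvAIdx N k i j).Pairwise (· < ·) := by
  fun_induction pvAIdx N k i j with
  | case1 j h ih =>
      refine List.Pairwise.cons ?_ ih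
      intro x hx
      rcases (mem_pvAIdx _ _).mp hx with ⟨-, hk, j', hj, rfl⟩
      have e : i + j' * k = i + j * k + (j' - j) * k := by ring
      have h0 : 1 * k ≤ (j' - j) * k := mul_le_mul_of_nonneg_right (by omega) (by omega)
      omega
  | case2 j h =>
      exact List.Pairwise.nil

lemma pvAIdx_eq_filter (N k i : Int) (hk : 0 < k) (hi : 0 ≤ i) (hik : i < k) :
    pvAIdx N k i 0 = (PySem.List.pyRange 0 N 1).filter (fun x => PySem.Int.mod x k == i) := by
  have hmod : ∀ x : Int, PySem.Int.mod x k = x % k := fun x => PySem.Int.mod_eq_emod_of_pos hk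
  apply List.eq_of_perm_of_sorted (le := (· < ·))
  · intro a b _ _ hab hba; omega
  · exact pairwise_pvAIdx N k i 0
  · exact (PySem.List.pairwise_lt_pyRange_one 0 N).filter _
  · rw [List.perm_ext_iff_of_nodup ((pairwise_pvAIdx N k i 0).imp ne_of_lt)
        (((PySem.List.pairwise_lt_pyRange_one 0 N).filter _).imp ne_of_lt)]
    intro x
    rw [mem_pvAIdx, List.mem_filter, PySem.List.mem_pyRange_one]
    constructor
    · rintro ⟨hx, -, j', hj, rfl⟩
      have h0 : 0 ≤ j' * k := mul_nonneg hj (le_of_lt hk)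
      refine ⟨⟨by omega, hx⟩, ?_⟩
      rw [beq_iff_eq, hmod, mul_comm j' k, Int.add_mul_emod_self_left]
      exact Int.emod_eq_of_lt hi hik
    · rintro ⟨⟨hx0, hxN⟩, hm⟩
      rw [beq_iff_eq, hmod] at hm
      refine ⟨hxN, hk, x / k, Int.ediv_nonneg hx0 (le_of_lt hk), ?_⟩
      have e := Int.ediv_add_emod x k
      calc x = k * (x / k) + x % k := e.symm
        _ = i + (x / k) * k := by rw [hm]; ring

lemma sum_map_sub_int {β : Type} (l : List β) (f g : β → Int) :
    (l.map (fun x => f x - g x)).sum = (l.map f).sum - (l.map g).sum := by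
  induction l with
  | nil => simp
  | cons x l ih => simp only [List.map_cons, List.sum_cons, ih]; ring

lemma sum_filter_classes {β : Type} (f : β → Nat) (Kn : Nat) :
    ∀ (l : List β), (∀ x ∈ l, f x < Kn) →
      ((List.range Kn).map (fun r => (((l.filter (fun x => f x == r)).length : Int)))).sum
        = (l.length : Int) := by
  intro l
  induction l with
  | nil => intro _; simp
  | cons x l ih =>
      intro hf
      have hx : f x < Kn := hf x (by simp)
      have hrest : ∀ y ∈ l, f y < Kn := fun y hy => hf y (List.mem_cons_of_mem _ hy)
      have e1 : ((List.range Kn).map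
            (fun r => (((List.filter (fun y => f y == r) (x :: l)).length : Int)))) =
          (List.range Kn).map (fun r =>
            (if (fun r => f x == r) r then (1 : Int) else 0)
              + ((List.filter (fun y => f y == r) l).length : Int)) := by
        apply List.map_congr_left
        intro r _
        by_cases h : f x = r
        · have hb : (f x == r) = true := by simp [h]
          simp [hb]
          omega
        · have hb : (f x == r) = false := by simp [h]
          simp [hb]
      rw [e1, PySem.List.sum_map_add_int, PySem.List.sum_map_ite_one_zero, ih hrest]
      have hpred : (fun r : Nat => f x == r) = (fun r : Nat => r == f x) := by
        funext r
        by_cases h : f x = r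
        · subst h; rfl
        · have h2 : ¬ r = f x := fun e => h e.symm
          simp [h, h2]
      have hcnt : (List.range Kn).countP (fun r : Nat => f x == r) = 1 := by
        rw [hpred]
        have hc : (List.range Kn).countP (fun r : Nat => r == f x) = (List.range Kn).count (f x) := rfl
        rw [hc]
        exact List.count_eq_one_of_mem (List.nodup_range) (List.mem_range.mpr hx)
      rw [hcnt]
      simp only [List.length_cons]
      push_cast
      ring

-- the character list of residue class r modulo k, and the per-class max count
def pvCls (cs : List Char) (N k : Int) (r : Nat) : List Char :=
  ((PySem.List.pyRange 0 N 1).filter (fun x => PySem.Int.mod x k == (r : Int))).map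
    (fun x => PySem.List.pyGetD cs x ' ')

def pvMaxv (d : PySem.Dict Char Int) : Int := (PySem.List.max? d.values (fun v => v)).getD 0

lemma filter_toNat_eq (N k : Int) (hk : 0 < k) (r : Nat) :
    (PySem.List.pyRange 0 N 1).filter (fun x => (PySem.Int.mod x k).toNat == r) =
    (PySem.List.pyRange 0 N 1).filter (fun x => PySem.Int.mod x k == (r : Int)) := by
  apply List.filter_congr
  intro x _
  have h1 := PySem.Int.mod_nonneg x hk
  rcases Int.eq_ofNat_of_zero_le h1 with ⟨n, hn⟩
  rw [hn]
  simp

lemma sum_classes (N k : Int) (hk : 0 < k) (hN : 0 ≤ N) :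
    ((List.range k.toNat).map (fun r : Nat =>
      ((((PySem.List.pyRange 0 N 1).filter
          (fun x => PySem.Int.mod x k == (r : Int))).length : Int)))).sum = N := by
  have e2 : ((List.range k.toNat).map (fun r : Nat =>
        ((((PySem.List.pyRange 0 N 1).filter
            (fun x => PySem.Int.mod x k == (r : Int))).length : Int)))).sum
      = ((List.range k.toNat).map (fun r : Nat =>
        ((((PySem.List.pyRange 0 N 1).filter
            (fun x => (PySem.Int.mod x k).toNat == r)).length : Int)))).sum := by
    apply congrArg
    apply List.map_congr_left
    intro r _
    rw [filter_toNat_eq N k hk r]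
  rw [e2, sum_filter_classes (fun x => (PySem.Int.mod x k).toNat) k.toNat
        (PySem.List.pyRange 0 N 1) ?hf]
  case hf =>
    intro x _
    show (PySem.Int.mod x k).toNat < k.toNat
    have h1 := PySem.Int.mod_nonneg x hk
    have h2 := PySem.Int.mod_lt x hk
    omega
  rw [PySem.List.pyRange_one]
  simp
  omega

-- A's per-divisor cost as a closed sum over residue classes
def cntSum (cs : List Char) (N k : Int) : Int :=
  N - ((List.range k.toNat).map
        (fun r => pvMaxv (PySem.Dict.counter (pvCls cs N k r)))).sum

lemma cntA_eq (cs : List Char) (N k : Int) (hk : 0 < k) (hN : 0 ≤ N) :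
    (PySem.List.pyRange 0 k 1).foldl (fun cnt i =>
        cnt + ((solveClass cs N k i 0 PySem.Dict.empty).1
          - (PySem.List.max? (solveClass cs N k i 0 PySem.Dict.empty).2.values (fun v => v)).getD 0)) 0
      = cntSum cs N k := by
  have hbody : ∀ (acc : Int), ∀ i ∈ PySem.List.pyRange 0 k 1,
      acc + ((solveClass cs N k i 0 PySem.Dict.empty).1
          - (PySem.List.max? (solveClass cs N k i 0 PySem.Dict.empty).2.values (fun v => v)).getD 0)
      = acc + ((((PySem.List.pyRange 0 N 1).filter (fun x => PySem.Int.mod x k == i)).length : Int)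
          - pvMaxv (PySem.Dict.counter
              (((PySem.List.pyRange 0 N 1).filter (fun x => PySem.Int.mod x k == i)).map
                (fun x => PySem.List.pyGetD cs x ' ')))) := by
    intro acc i hi
    rcases PySem.List.mem_pyRange_one.mp hi with ⟨hi0, hik⟩
    rw [solveClass_eq, pvAIdx_eq_filter N k i hk hi0 hik]
    unfold pvMaxv
    rw [PySem.Dict.counter_eq_foldl, List.foldl_map]
    simp
  rw [PySem.List.foldl_congr_mem _ _ _ _ hbody]
  have hkk : k = ((k.toNat : Nat) : Int) := (Int.toNat_of_nonneg (le_of_lt hk)).symm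
  have hrange : PySem.List.pyRange 0 k 1 = (List.range k.toNat).map (fun r : Nat => (r : Int)) := by
    conv_lhs => rw [hkk]
    rw [PySem.List.pyRange_zero_natCast]
  rw [hrange, List.foldl_map, PySem.List.foldl_add, zero_add, sum_map_sub_int,
      sum_classes N k hk hN]
  unfold cntSum pvCls
  rfl

-- first k in ks passing cond, else dflt
def pvFind (cond : Int → Bool) (dflt : Int) : List Int → Int
  | [] => dflt
  | k :: ks => if cond k then k else pvFind cond dflt ks

lemma foldl_min_const (cond : Int → Bool) :
    ∀ (ks : List Int) (a : Int), (∀ k ∈ ks, a ≤ k) →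
      ks.foldl (fun ans k => if cond k then min k ans else ans) a = a := by
  intro ks
  induction ks with
  | nil => intro a _; rfl
  | cons k ks ih =>
      intro a h
      rw [List.foldl_cons]
      have hka : a ≤ k := h k (by simp)
      have e : (if cond k then min k a else a) = a := by
        split
        · omega
        · rfl
      rw [e, ih a (fun k' hk' => h k' (List.mem_cons_of_mem _ hk'))]

lemma foldl_min_eq_find (cond : Int → Bool) (a : Int) :
    ∀ ks : List Int, ks.Pairwise (· ≤ ·) → (∀ k ∈ ks, k ≤ a) →
      ks.foldl (fun ans k => if cond k then min k ans else ans) a = pvFind cond a ks := by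
  intro ks
  induction ks with
  | nil => intro _ _; rfl
  | cons k ks ih =>
      intro hp ha
      rcases List.pairwise_cons.mp hp with ⟨hle, hp'⟩
      rw [List.foldl_cons, pvFind]
      by_cases hc : cond k = true
      · rw [if_pos hc, if_pos hc]
        have e : min k a = k := by have := ha k (by simp); omega
        rw [e]
        exact foldl_min_const cond ks k hle
      · rw [if_neg hc, if_neg hc]
        exact ih hp' (fun k' hk' => ha k' (List.mem_cons_of_mem _ hk'))

lemma pvFind_filter (p c : Int → Bool) (d : Int) :
    ∀ L : List Int, pvFind (fun k => p k && c k) d L = pvFind c d (L.filter p) := by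
  intro L
  induction L with
  | nil => rfl
  | cons k ks ih =>
      rw [pvFind, List.filter_cons]
      by_cases hp : p k = true
      · simp only [hp, Bool.true_and, if_true, pvFind]
        by_cases hc : c k = true
        · rw [if_pos hc, if_pos hc]
        · rw [if_neg hc, if_neg hc, ih]
      · simp only [hp, Bool.false_and, Bool.false_eq_true, if_false, ih]

lemma pvFind_congr (c1 c2 : Int → Bool) (d : Int) :
    ∀ L : List Int, (∀ k ∈ L, c1 k = c2 k) → pvFind c1 d L = pvFind c2 d L := by
  intro L
  induction L with
  | nil => intro _; rfl
  | cons k ks ih =>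
      intro h
      rw [pvFind, pvFind, h k (by simp), ih (fun k' hk' => h k' (List.mem_cons_of_mem _ hk'))]

-- ---- B's longest-run scan on a sorted column = max character multiplicity ----

-- maximal run length, given a pending run of length r of character c before M
def pvG (r : Int) (c : Char) : List Char → Int
  | [] => r
  | x :: xs => if x = c then pvG (r + 1) c xs else max r (pvG 1 x xs)

lemma pvG_ge : ∀ (M : List Char) (r : Int) (c : Char), r ≤ pvG r c M := by
  intro M
  induction M with
  | nil => intro r c; exact le_refl r
  | cons x xs ih =>
      intro r c
      rw [pvG]
      by_cases h : x = c
      · rw [if_pos h]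
        have := ih (r + 1) c
        omega
      · rw [if_neg h]
        exact le_max_left _ _

-- the port's (best, run) fold over consecutive pairs computes pvG
lemma zipScan : ∀ (t : List Char) (c : Char) (b r : Int), 1 ≤ r → r ≤ b →
    (((c :: t).zip t).foldl
      (fun (p : Int × Int) ab =>
        let run := if ab.1 == ab.2 then p.2 + 1 else 1
        (if run > p.1 then run else p.1, run)) (b, r)).1 = max b (pvG r c t) := by
  intro t
  induction t with
  | nil =>
      intro c b r h1 hrb
      simp only [List.zip_nil_right, List.foldl_nil, pvG]
      omega
  | cons y ys ih =>
      intro c b r h1 hrb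
      simp only [List.zip_cons_cons, List.foldl_cons]
      by_cases h : c = y
      · have hb : (c == y) = true := by simp [h]
        simp only [hb, if_true]
        have e1 : (if r + 1 > b then r + 1 else b) = max b (r + 1) := by omega
        rw [e1]
        rw [ih y (max b (r + 1)) (r + 1) (by omega) (le_max_right _ _)]
        subst h
        rw [pvG, if_pos rfl]
        have hg := pvG_ge ys (r + 1) c
        rw [max_assoc, max_eq_right (le_trans (by omega) hg)]
      · have hb : (c == y) = false := by simp [h]
        simp only [hb, Bool.false_eq_true, if_false]
        have e1 : (if (1 : Int) > b then (1 : Int) else b) = b := by omega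
        rw [e1, ih y b 1 (le_refl _) (by omega)]
        rw [pvG, if_neg (fun e => h e.symm)]
        omega

-- max multiplicity of a list, as a fold
def pvMC (L : List Char) : Int := (L.map (fun x => (L.count x : Int))).foldl max 0

lemma foldl_max_max (a : Int) : ∀ (Q : List Int) (b : Int),
    Q.foldl max (max a b) = max a (Q.foldl max b) := by
  intro Q
  induction Q with
  | nil => intro b; rfl
  | cons q qs ih =>
      intro b
      rw [List.foldl_cons, List.foldl_cons, max_assoc, ih]

lemma fmax_append (P Q : List Int) (hP : ∀ x ∈ P, 0 ≤ x) :
    (P ++ Q).foldl max 0 = max (P.foldl max 0) (Q.foldl max 0) := by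
  rw [List.foldl_append]
  have h0 : 0 ≤ P.foldl max 0 := (PySem.List.le_foldl_max P 0).1
  have e : P.foldl max 0 = max (P.foldl max 0) 0 := by omega
  rw [e, foldl_max_max]
  omega

lemma fmax_mem (l : List Int) (hne : l ≠ []) (h0 : ∀ x ∈ l, 0 ≤ x) :
    l.foldl max 0 ∈ l ∧ ∀ x ∈ l, x ≤ l.foldl max 0 := by
  have hub := (PySem.List.le_foldl_max l 0).2
  rcases PySem.List.foldl_max_mem l 0 with h | h
  · rcases List.exists_mem_of_ne_nil l hne with ⟨y, hy⟩
    have h1 := hub y hy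
    have h2 := h0 y hy
    have : y = l.foldl max 0 := by omega
    exact ⟨this ▸ hy, hub⟩
  · exact ⟨h, hub⟩

lemma fmax_replicate (n : Nat) (hn : 0 < n) (v : Int) (hv : 0 ≤ v) :
    (List.replicate n v).foldl max 0 = v := by
  have hne : List.replicate n v ≠ [] := by
    intro h
    have := congrArg List.length h
    simp at this
    omega
  have h0 : ∀ x ∈ List.replicate n v, 0 ≤ x := by
    intro x hx
    rw [List.eq_of_mem_replicate hx]
    exact hv
  exact List.eq_of_mem_replicate (fmax_mem _ hne h0).1

lemma pvMC_replicate (n : Nat) (hn : 0 < n) (c : Char) :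
    pvMC (List.replicate n c) = (n : Int) := by
  unfold pvMC
  have hcnt : (((List.replicate n c).count c : Nat) : Int) = (n : Int) := by
    simp [List.count_replicate_self]
  rw [List.map_replicate, hcnt, fmax_replicate n hn _ (by positivity)]

lemma pvMC_append_disjoint (A B : List Char) (hd : ∀ a ∈ A, a ∉ B) :
    pvMC (A ++ B) = max (pvMC A) (pvMC B) := by
  unfold pvMC
  have ecount : (A ++ B).map (fun x => (((A ++ B).count x : Nat) : Int))
      = A.map (fun x => ((A.count x : Nat) : Int)) ++ B.map (fun x => ((B.count x : Nat) : Int)) := by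
    rw [List.map_append]
    congr 1
    · apply List.map_congr_left
      intro a ha
      have : B.count a = 0 := List.count_eq_zero.mpr (hd a ha)
      rw [List.count_append, this]
      simp
    · apply List.map_congr_left
      intro b hb
      have : A.count b = 0 := List.count_eq_zero.mpr (fun hbA => hd b hbA hb)
      rw [List.count_append, this]
      simp
  rw [ecount, fmax_append]
  intro x hx
  rcases List.mem_map.mp hx with ⟨a, -, rfl⟩
  positivity

lemma pvG_eq_MC : ∀ (M : List Char), M.Pairwise (· ≤ ·) →
    ∀ (c : Char) (n : Nat), 0 < n → (∀ x ∈ M, c ≤ x) →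
      pvG (n : Int) c M = pvMC (List.replicate n c ++ M) := by
  intro M
  induction M with
  | nil =>
      intro _ c n hn _
      rw [pvG, List.append_nil, pvMC_replicate n hn]
  | cons x xs ih =>
      intro hp c n hn hc
      rcases List.pairwise_cons.mp hp with ⟨hx_le, hp'⟩
      by_cases hxc : x = c
      · subst hxc
        rw [pvG, if_pos rfl]
        have e1 : ((n : Int) + 1) = (((n + 1 : Nat)) : Int) := by push_cast; ring
        rw [e1, ih hp' x (n + 1) (by omega) hx_le]
        have e2 : List.replicate (n + 1) x ++ xs = List.replicate n x ++ x :: xs := by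
          rw [List.replicate_succ']
          simp
        rw [e2]
      · rw [pvG, if_neg hxc]
        have hcx : c < x := lt_of_le_of_ne (hc x (by simp)) (fun e => hxc e.symm)
        have hrec : pvG 1 x xs = pvMC (x :: xs) := by
          have := ih hp' x 1 (by omega) hx_le
          simpa using this
        rw [hrec]
        have hdisj : ∀ a ∈ List.replicate n c, a ∉ (x :: xs) := by
          intro a ha hmem
          rw [List.eq_of_mem_replicate ha] at hmem
          rcases List.mem_cons.mp hmem with rfl | hmem'
          · exact absurd rfl (ne_of_lt hcx)
          · exact absurd (hx_le c hmem') (not_le.mpr hcx)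
        rw [pvMC_append_disjoint _ _ hdisj, pvMC_replicate n hn]

lemma best_col_eq (col : List Char) (hne : col ≠ []) :
    (((PySem.List.sorted col (fun c => c) false).zip
        (PySem.List.sorted col (fun c => c) false).tail).foldl
      (fun (p : Int × Int) ab =>
        let run := if ab.1 == ab.2 then p.2 + 1 else 1
        (if run > p.1 then run else p.1, run)) ((1 : Int), (1 : Int))).1
    = pvMaxv (PySem.Dict.counter col) := by
  have hperm : (PySem.List.sorted col (fun c => c) false).Perm col :=
    PySem.List.sorted_perm col (fun c => c) false
  have hpw : (PySem.List.sorted col (fun c => c) false).Pairwise (fun a b => a ≤ b) :=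
    PySem.List.sorted_pairwise col (fun c => c)
  cases hsrt : PySem.List.sorted col (fun c => c) false with
  | nil =>
      rw [hsrt] at hperm
      exact absurd (hperm.symm.eq_nil) hne
  | cons m t =>
      rw [hsrt] at hperm hpw
      rcases List.pairwise_cons.mp hpw with ⟨hmle, hp'⟩
      simp only [List.tail_cons]
      rw [zipScan t m 1 1 (le_refl _) (le_refl _)]
      have h1g := pvG_ge t 1 m
      have e1 : max 1 (pvG 1 m t) = pvG 1 m t := by omega
      rw [e1]
      have ecast : (1 : Int) = ((1 : Nat) : Int) := by norm_num
      rw [ecast, pvG_eq_MC t hp' m 1 (by omega) hmle]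
      have e2 : List.replicate 1 m ++ t = m :: t := by simp
      rw [e2]
      -- pvMaxv (counter col) = pvMC (m :: t)
      unfold pvMaxv
      have hvals : (PySem.Dict.counter col).values
          = (PySem.Set.ofList col).map (fun k => ((col.count k : Nat) : Int)) := by
        simp only [PySem.Dict.values, PySem.Dict.items_counter, List.map_map]
        rfl
      rcases List.exists_mem_of_ne_nil col hne with ⟨y, hy⟩
      have hy' : y ∈ PySem.Set.ofList col := (PySem.Set.mem_ofList col y).mpr hy
      cases hv : (PySem.Dict.counter col).values with
      | nil =>
          rw [hvals] at hv
          have : ((col.count y : Nat) : Int) ∈ (PySem.Set.ofList col).map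
              (fun k => ((col.count k : Nat) : Int)) := List.mem_map_of_mem hy'
          rw [hv] at this
          exact absurd this (List.not_mem_nil)
      | cons v vt =>
          rw [PySem.List.max?_id_cons, Option.getD_some]
          -- both sides are the greatest element of lists with the same members
          have hmem1 : ∀ x ∈ v :: vt, x ∈ (m :: t).map (fun x => (((m :: t).count x : Nat) : Int)) := by
            intro x hx
            rw [← hv, hvals] at hx
            rcases List.mem_map.mp hx with ⟨a, ha, rfl⟩
            have hac : a ∈ col := (PySem.Set.mem_ofList col a).mp ha
            have ham : a ∈ m :: t := hperm.mem_iff.mpr hac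
            have : (m :: t).count a = col.count a := hperm.count_eq a
            rw [← this]
            exact List.mem_map_of_mem ham
          have hmem2 : ∀ x ∈ (m :: t).map (fun x => (((m :: t).count x : Nat) : Int)), x ∈ v :: vt := by
            intro x hx
            rcases List.mem_map.mp hx with ⟨a, ha, rfl⟩
            have hac : a ∈ col := hperm.mem_iff.mp ha
            have ha' : a ∈ PySem.Set.ofList col := (PySem.Set.mem_ofList col a).mpr hac
            have : (m :: t).count a = col.count a := hperm.count_eq a
            rw [this, ← hv, hvals]
            exact List.mem_map_of_mem ha'
          have hm1mem : vt.foldl max v ∈ v :: vt := by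
            rcases PySem.List.foldl_max_mem vt v with h | h
            · rw [h]; exact List.mem_cons_self
            · exact List.mem_cons_of_mem _ h
          have hub1 : ∀ x ∈ v :: vt, x ≤ vt.foldl max v := by
            intro x hx
            rcases List.mem_cons.mp hx with rfl | hx'
            · exact (PySem.List.le_foldl_max vt x).1
            · exact (PySem.List.le_foldl_max vt v).2 x hx'
          have hfm := fmax_mem ((m :: t).map (fun x => (((m :: t).count x : Nat) : Int)))
            (by simp) (by
              intro x hx
              rcases List.mem_map.mp hx with ⟨a, -, rfl⟩
              positivity)
          have hle1 : vt.foldl max v ≤ pvMC (m :: t) := hfm.2 _ (hmem1 _ hm1mem)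
          have hle2 : pvMC (m :: t) ≤ vt.foldl max v := hub1 _ (hmem2 _ hfm.1)
          omega

-- ---- transpose: pvZipT of equal-width rows is the list of columns ----

lemma pvZipT_cols : ∀ (Kn : Nat) (rows : List (List Char)), rows ≠ [] →
    (∀ row ∈ rows, row.length = Kn) →
    pvZipT rows = (List.range Kn).map (fun r => rows.map (fun row => row.getD r ' ')) := by
  intro Kn
  induction Kn with
  | zero =>
      intro rows hne hlen
      rw [pvZipT, dif_neg, List.range_zero, List.map_nil]
      rintro ⟨-, hall⟩
      rcases List.exists_mem_of_ne_nil rows hne with ⟨row, hrow⟩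
      exact hall row hrow (List.length_eq_zero_iff.mp (hlen row hrow))
  | succ Kn ih =>
      intro rows hne hlen
      rw [pvZipT, dif_pos ⟨hne, fun r hr => by
        intro h
        have := hlen r hr
        rw [h] at this
        simp at this⟩]
      have htail : ∀ row ∈ rows.map (fun r => r.tail), row.length = Kn := by
        intro row hrow
        rcases List.mem_map.mp hrow with ⟨r0, hr0, rfl⟩
        have := hlen r0 hr0
        simp [List.length_tail, this]
      rw [ih (rows.map (fun r => r.tail)) (by simpa using hne) htail]
      rw [List.range_succ_eq_map, List.map_cons]
      congr 1
      · apply List.map_congr_left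
        intro row hrow
        have h0 : row.length = Kn + 1 := hlen row hrow
        cases row with
        | nil => simp at h0
        | cons a as => rfl
      · rw [List.map_map]
        apply List.map_congr_left
        intro r _
        simp only [Function.comp, List.map_map]
        apply List.map_congr_left
        intro row hrow
        have h0 : row.length = Kn + 1 := hlen row hrow
        cases row with
        | nil => simp at h0
        | cons a as => rfl

-- ---- a step-k pyRange is a cons, and the stride list is pvAIdx ----

lemma pyRange_pos_cons (a b s : Int) (hs : 0 < s) (hab : a < b) :
    PySem.List.pyRange a b s = a :: PySem.List.pyRange (a + s) b s := by
  rw [PySem.List.pyRange_of_pos a b hs, PySem.List.pyRange_of_pos (a + s) b hs]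
  have hnum : b - a + s - 1 = (b - (a + s) + s - 1) + 1 * s := by ring
  have hdiv : (b - a + s - 1) / s = (b - (a + s) + s - 1) / s + 1 := by
    rw [hnum, Int.add_mul_ediv_right _ _ (by omega)]
  by_cases h2 : a + s < b
  · have hnn : 0 ≤ (b - (a + s) + s - 1) / s := Int.ediv_nonneg (by omega) (by omega)
    rw [if_pos hab, if_pos h2, hdiv]
    have e1 : ((b - (a + s) + s - 1) / s + 1).toNat = ((b - (a + s) + s - 1) / s).toNat + 1 := by
      omega
    rw [e1, List.range_succ_eq_map, List.map_cons, List.map_map]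
    congr 1
    · omega
    · apply List.map_congr_left
      intro t _
      simp only [Function.comp]
      push_cast
      ring
  · have hz : (b - (a + s) + s - 1) / s = 0 := by
      apply Int.ediv_eq_zero_of_lt <;> omega
    rw [if_pos hab, if_neg h2, hdiv, hz]
    norm_num

lemma stride_aux (N k r : Int) (hk : 0 < k) (hd : k ∣ N) (hr : 0 ≤ r) (hrk : r < k) :
    ∀ (n : Nat) (j0 : Int), 0 ≤ j0 → (N - j0 * k).toNat ≤ n →
      (PySem.List.pyRange (j0 * k) N k).map (· + r) = pvAIdx N k r j0 := by
  intro n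
  induction n with
  | zero =>
      intro j0 hj0 hm
      have hge : N ≤ j0 * k := by omega
      rw [PySem.List.pyRange_of_pos _ _ hk, if_neg (by omega), List.range_zero,
        List.map_nil, List.map_nil, pvAIdx_neg (by omega)]
  | succ n ihn =>
      intro j0 hj0 hm
      by_cases hlt : j0 * k < N
      · have hdvd : k ∣ N - j0 * k := by
          exact dvd_sub hd (Dvd.intro j0 (mul_comm k j0))
        have hstep : k ≤ N - j0 * k := Int.le_of_dvd (by omega) hdvd
        rw [pyRange_pos_cons _ _ _ hk hlt, List.map_cons, pvAIdx_pos ⟨by omega, hk⟩]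
        congr 1
        · omega
        · have e : j0 * k + k = (j0 + 1) * k := by ring
          rw [e]
          apply ihn (j0 + 1) (by omega)
          have e2 : (j0 + 1) * k = j0 * k + k := by ring
          omega
      · rw [PySem.List.pyRange_of_pos _ _ hk, if_neg (by omega), List.range_zero,
          List.map_nil, List.map_nil, pvAIdx_neg (by omega)]

lemma stride_eq (N k r : Int) (hk : 0 < k) (hd : k ∣ N) (hr : 0 ≤ r) (hrk : r < k) :
    (PySem.List.pyRange 0 N k).map (· + r) = pvAIdx N k r 0 := by
  have h := stride_aux N k r hk hd hr hrk (N - 0 * k).toNat 0 (le_refl _) (le_refl _)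
  rw [zero_mul] at h
  exact h

lemma periodCost_eq (cs : List Char) (N k : Int) (hk : 0 < k) (hd : k ∣ N)
    (h2 : 2 * k ≤ N) (hlen : N ≤ (cs.length : Int)) :
    periodCost cs N k = cntSum cs N k := by
  have hkN : k < N := by omega
  have hjk : ∀ j : Int, j ∈ PySem.List.pyRange 0 N k → 0 ≤ j ∧ j + k ≤ N := by
    intro j hj
    rcases (PySem.List.mem_pyRange_iff_of_pos hk j).mp hj with ⟨hj0, hjN, hjd⟩
    have hdvd : k ∣ N - j := dvd_sub hd (by simpa using hjd)
    have := Int.le_of_dvd (by omega) hdvd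
    exact ⟨hj0, by omega⟩
  unfold periodCost
  simp only []
  have hchne : (PySem.List.pyRange 0 N k).map
      (fun j => PySem.List.slice cs (some j) (some (j + k))) ≠ [] := by
    have h0 : (0 : Int) ∈ PySem.List.pyRange 0 N k :=
      (PySem.List.mem_pyRange_iff_of_pos hk 0).mpr ⟨le_refl _, by omega, by simp⟩
    intro h
    rw [List.map_eq_nil_iff] at h
    rw [h] at h0
    exact absurd h0 (List.not_mem_nil)
  have hchlen : ∀ row ∈ (PySem.List.pyRange 0 N k).map
      (fun j => PySem.List.slice cs (some j) (some (j + k))), row.length = k.toNat := by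
    intro row hrow
    rcases List.mem_map.mp hrow with ⟨j, hj, rfl⟩
    rcases hjk j hj with ⟨hj0, hjN⟩
    rw [PySem.List.slice_toNat cs hj0 (by omega), List.length_take, List.length_drop]
    omega
  rw [pvZipT_cols k.toNat _ hchne hchlen]
  have hcols : ∀ r ∈ List.range k.toNat,
      ((PySem.List.pyRange 0 N k).map
        (fun j => PySem.List.slice cs (some j) (some (j + k)))).map (fun row => row.getD r ' ')
      = pvCls cs N k r := by
    intro r hr
    rw [List.mem_range] at hr
    rw [List.map_map]
    have hstep : ∀ j ∈ PySem.List.pyRange 0 N k,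
        ((fun row => row.getD r ' ') ∘ (fun j => PySem.List.slice cs (some j) (some (j + k)))) j
        = ((fun x => PySem.List.pyGetD cs x ' ') ∘ (· + (r : Int))) j := by
      intro j hj
      rcases hjk j hj with ⟨hj0, hjN⟩
      simp only [Function.comp]
      rw [PySem.List.slice_toNat cs hj0 (by omega),
          List.getD_eq_getElem?_getD, List.getElem?_take, if_pos (by omega),
          List.getElem?_drop,
          PySem.List.pyGetD_of_nonneg cs ' ' (by omega),
          List.getD_eq_getElem?_getD]
      congr 2
      omega
    rw [List.map_congr_left hstep, ← List.map_map,
        stride_eq N k r hk hd (by omega) (by omega),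
        pvAIdx_eq_filter N k (r : Int) hk (by omega) (by omega)]
    rfl
  rw [List.map_congr_left hcols, PySem.List.foldl_add, zero_add, List.map_map]
  have hcls_ne : ∀ r ∈ List.range k.toNat, pvCls cs N k r ≠ [] := by
    intro r hr
    rw [List.mem_range] at hr
    unfold pvCls
    have hmem : (r : Int) ∈ (PySem.List.pyRange 0 N 1).filter
        (fun x => PySem.Int.mod x k == (r : Int)) := by
      rw [List.mem_filter, PySem.List.mem_pyRange_one]
      refine ⟨⟨by omega, by omega⟩, ?_⟩
      rw [PySem.Int.mod_eq_emod_of_pos hk, Int.emod_eq_of_lt (by omega) (by omega)]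
      simp
    intro h
    rw [List.map_eq_nil_iff] at h
    rw [h] at hmem
    exact absurd hmem (List.not_mem_nil)
  have hpt : ∀ r ∈ List.range k.toNat,
      ((fun col =>
          ((col.length : Int) -
            (((PySem.List.sorted col (fun c => c) false).zip
                (PySem.List.slice (PySem.List.sorted col (fun c => c) false) (some 1) none)).foldl
              (fun (p : Int × Int) ab =>
                let run := if ab.1 == ab.2 then p.2 + 1 else 1
                (if run > p.1 then run else p.1, run)) ((1 : Int), (1 : Int))).1)) ∘
        (pvCls cs N k)) r
      = ((pvCls cs N k r).length : Int) - pvMaxv (PySem.Dict.counter (pvCls cs N k r)) := by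
    intro r hr
    simp only [Function.comp]
    rw [PySem.List.slice_from_one, best_col_eq (pvCls cs N k r) (hcls_ne r hr)]
  rw [List.map_congr_left hpt]
  have hsub := sum_map_sub_int (List.range k.toNat)
    (fun r => ((pvCls cs N k r).length : Int))
    (fun r => pvMaxv (PySem.Dict.counter (pvCls cs N k r)))
  rw [hsub]
  have hlens : ((List.range k.toNat).map (fun r => ((pvCls cs N k r).length : Int))).sum = N := by
    have e : (List.range k.toNat).map (fun r => ((pvCls cs N k r).length : Int))
        = (List.range k.toNat).map (fun r : Nat =>
            ((((PySem.List.pyRange 0 N 1).filter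
                (fun x => PySem.Int.mod x k == (r : Int))).length : Int))) := by
      apply List.map_congr_left
      intro r _
      unfold pvCls
      rw [List.length_map]
    rw [e, sum_classes N k hk (by omega)]
  rw [hlens]
  rfl

-- ---- sqrt-paired divisor enumeration ----

lemma divLoop_gt (N i : Int) (h1 : 1 ≤ i) (hg : ¬ i * i ≤ N) :
    ∀ x, ¬ (x ∣ N ∧ ((i ≤ x ∧ x * x ≤ N) ∨ (1 ≤ x ∧ N < x * x ∧ i * x ≤ N))) := by
  rintro x ⟨-, ⟨hix, hxx⟩ | ⟨hx1, hNxx, hixN⟩⟩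
  · have : i * i ≤ x * x := mul_le_mul hix hix (by omega) (by omega)
    omega
  · have hi0 : 0 < i := by omega
    have hxi : x < i := by
      by_contra hge
      have : i * i ≤ i * x := mul_le_mul_of_nonneg_left (by omega) (by omega)
      omega
    have h3 : x * x < x * i := mul_lt_mul_of_pos_left hxi (by omega)
    have h4 : x * i = i * x := mul_comm x i
    omega

lemma divLoop_mem (N : Int) : ∀ (n : Nat) (i : Int), 1 ≤ i → (N + 1 - i).toNat ≤ n →
    ∀ x, x ∈ divLoop N i ↔
      x ∣ N ∧ ((i ≤ x ∧ x * x ≤ N) ∨ (1 ≤ x ∧ N < x * x ∧ i * x ≤ N)) := by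
  intro n
  induction n with
  | zero =>
      intro i h1 hm x
      have hg : ¬ i * i ≤ N := by
        have : i * 1 ≤ i * i := mul_le_mul_of_nonneg_left (by omega) (by omega)
        omega
      rw [divLoop, dif_neg (fun h => hg h.1)]
      simp only [List.not_mem_nil, false_iff]
      exact divLoop_gt N i h1 hg x
  | succ n ih =>
      intro i h1 hm x
      by_cases hg : i * i ≤ N
      · have hi1 : i * 1 ≤ i * i := mul_le_mul_of_nonneg_left (by omega) (by omega)
        have hiN : i ≤ N := by omega
        rw [divLoop, dif_pos ⟨hg, by omega⟩, List.mem_append,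
            ih (i + 1) (by omega) (by omega) x]
        have hmod : (PySem.Int.mod N i == 0) = true ↔ i ∣ N := by
          rw [beq_iff_eq, PySem.Int.mod_eq_zero_iff_dvd]
        have hfd : 0 < i → PySem.Int.floordiv N i = N / i :=
          fun h => PySem.Int.floordiv_eq_ediv_of_pos h
        constructor
        · rintro (hblk | ⟨hdvd, hcase⟩)
          · -- x is i or N // i
            by_cases hm0 : (PySem.Int.mod N i == 0) = true
            · have hdvd : i ∣ N := hmod.mp hm0
              rw [if_pos hm0, hfd (by omega)] at hblk
              have hq : i * (N / i) = N := Int.mul_ediv_cancel' hdvd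
              rcases List.mem_cons.mp hblk with rfl | hblk'
              · exact ⟨hdvd, Or.inl ⟨le_refl _, hg⟩⟩
              · have hne : N / i ≠ i := by
                  by_contra he
                  rw [if_neg (by simpa using he)] at hblk'
                  exact absurd hblk' (List.not_mem_nil)
                rw [if_pos (by simpa using hne)] at hblk'
                have hx : x = N / i := by simpa using hblk'
                subst hx
                have hcomm : i * (N / i) = N / i * i := mul_comm _ _
                have hdvd2 : N / i ∣ N := ⟨i, by omega⟩
                have hiq : i ≤ N / i := by
                  by_contra hgt
                  have : i * (N / i) < i * i := mul_lt_mul_of_pos_left (by omega) (by omega)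
                  omega
                have hiq' : i < N / i := lt_of_le_of_ne hiq (fun e => hne e.symm)
                have hqq : N < (N / i) * (N / i) := by
                  have : i * (N / i) < (N / i) * (N / i) :=
                    mul_lt_mul_of_pos_right hiq' (by omega)
                  omega
                exact ⟨hdvd2, Or.inr ⟨by omega, hqq, by omega⟩⟩
            · rw [if_neg hm0] at hblk
              exact absurd hblk (List.not_mem_nil)
          · refine ⟨hdvd, ?_⟩
            rcases hcase with ⟨hix, hxx⟩ | ⟨hx1, hNxx, hixN⟩
            · exact Or.inl ⟨by omega, hxx⟩
            · have e : (i + 1) * x = i * x + x := by ring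
              exact Or.inr ⟨hx1, hNxx, by omega⟩
        · rintro ⟨hdvd, hcase⟩
          rcases hcase with ⟨hix, hxx⟩ | ⟨hx1, hNxx, hixN⟩
          · by_cases hxi : x = i
            · subst hxi
              have hm0 : (PySem.Int.mod N x == 0) = true := hmod.mpr hdvd
              left
              rw [if_pos hm0]
              exact List.mem_cons_self
            · exact Or.inr ⟨hdvd, Or.inl ⟨by omega, hxx⟩⟩
          · have hq : x * (N / x) = N := Int.mul_ediv_cancel' hdvd
            have hqx : i ≤ N / x := by
              by_contra hgt
              have : (N / x) * x < i * x := mul_lt_mul_of_pos_right (by omega) (by omega)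
              have e : (N / x) * x = x * (N / x) := mul_comm _ _
              omega
            by_cases hnext : (i + 1) * x ≤ N
            · exact Or.inr ⟨hdvd, Or.inr ⟨hx1, hNxx, hnext⟩⟩
            · have hqi : N / x ≤ i := by
                by_contra hgt
                have : (i + 1) * x ≤ (N / x) * x :=
                  mul_le_mul_of_nonneg_right (by omega) (by omega)
                have e : (N / x) * x = x * (N / x) := mul_comm _ _
                omega
              have hqe : N / x = i := by omega
              have hNe : N = i * x := by
                rw [← hq, hqe]
                ring
              have hdvd2 : i ∣ N := Dvd.intro x (by omega)
              have hm0 : (PySem.Int.mod N i == 0) = true := hmod.mpr hdvd2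
              have hfdx : PySem.Int.floordiv N i = x := by
                rw [hfd (by omega), hNe, Int.mul_ediv_cancel_left x (by omega)]
              left
              rw [if_pos hm0, hfdx]
              by_cases hxie : x = i
              · subst hxie
                exact List.mem_cons_self
              · rw [if_pos (by simpa using hxie)]
                simp
      · rw [divLoop, dif_neg (fun h => hg h.1)]
        simp only [List.not_mem_nil, false_iff]
        exact divLoop_gt N i h1 hg x

lemma divLoop_nodup (N : Int) : ∀ (n : Nat) (i : Int), 1 ≤ i → (N + 1 - i).toNat ≤ n →
    (divLoop N i).Nodup := by
  intro n
  induction n with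
  | zero =>
      intro i h1 hm
      have hg : ¬ i * i ≤ N := by
        have : i * 1 ≤ i * i := mul_le_mul_of_nonneg_left (by omega) (by omega)
        omega
      rw [divLoop, dif_neg (fun h => hg h.1)]
      exact List.nodup_nil
  | succ n ih =>
      intro i h1 hm
      by_cases hg : i * i ≤ N
      · have hi1 : i * 1 ≤ i * i := mul_le_mul_of_nonneg_left (by omega) (by omega)
        rw [divLoop, dif_pos ⟨hg, by omega⟩, List.nodup_append]
        refine ⟨?_, ih (i + 1) (by omega) (by omega), ?_⟩
        · by_cases hm0 : (PySem.Int.mod N i == 0) = true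
          · rw [if_pos hm0]
            by_cases hne : (PySem.Int.floordiv N i != i) = true
            · rw [if_pos hne]
              have hne' : PySem.Int.floordiv N i ≠ i := by simpa using hne
              refine List.nodup_cons.mpr ⟨?_, List.nodup_singleton _⟩
              simp only [List.mem_singleton]
              exact fun e => hne' e.symm
            · rw [if_neg hne]
              simp
          · rw [if_neg hm0]
            exact List.nodup_nil
        · intro x hxblk y hyrec he
          subst he
          rw [divLoop_mem N n (i + 1) (by omega) (by omega) x] at hyrec
          have hxrec := hyrec
          rcases hxrec with ⟨hdvd, hcase⟩
          by_cases hm0 : (PySem.Int.mod N i == 0) = true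
          · have hidvd : i ∣ N := by
              rw [beq_iff_eq, PySem.Int.mod_eq_zero_iff_dvd] at hm0
              exact hm0
            rw [if_pos hm0, PySem.Int.floordiv_eq_ediv_of_pos (by omega)] at hxblk
            have hq : i * (N / i) = N := Int.mul_ediv_cancel' hidvd
            rcases List.mem_cons.mp hxblk with rfl | hblk'
            · rcases hcase with ⟨hix, -⟩ | ⟨-, hNxx, -⟩
              · omega
              · omega
            · have hne : N / i ≠ i := by
                by_contra he
                rw [if_neg (by simpa using he)] at hblk'
                exact absurd hblk' (List.not_mem_nil)
              rw [if_pos (by simpa using hne)] at hblk'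
              have hx : x = N / i := by simpa using hblk'
              subst hx
              have hiq : i ≤ N / i := by
                by_contra hgt
                have : i * (N / i) < i * i := mul_lt_mul_of_pos_left (by omega) (by omega)
                omega
              have hiq' : i < N / i := lt_of_le_of_ne hiq (fun e => hne e.symm)
              have hqq : N < (N / i) * (N / i) := by
                have : i * (N / i) < (N / i) * (N / i) :=
                  mul_lt_mul_of_pos_right hiq' (by omega)
                omega
              rcases hcase with ⟨-, hxx⟩ | ⟨-, -, hixN⟩
              · omega
              · have e : (i + 1) * (N / i) = i * (N / i) + N / i := by ring
                omega
          · rw [if_neg hm0] at hxblk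
            exact absurd hxblk (List.not_mem_nil)
      · rw [divLoop, dif_neg (fun h => hg h.1)]
        exact List.nodup_nil

lemma sorted_divs (N : Int) :
    PySem.List.sorted (divLoop N 1) (fun d => d) false
      = (PySem.List.pyRange 1 (N + 1) 1).filter (fun k => PySem.Int.mod N k == 0) := by
  apply PySem.List.sorted_eq_of_perm_of_pairwise_lt
  · rw [List.perm_ext_iff_of_nodup
      (List.Nodup.filter _ ((PySem.List.pairwise_lt_pyRange_one 1 (N + 1)).imp ne_of_lt))
      (divLoop_nodup N (N + 1 - 1).toNat 1 (le_refl _) (le_refl _))]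
    intro x
    rw [List.mem_filter, PySem.List.mem_pyRange_one,
        divLoop_mem N (N + 1 - 1).toNat 1 (le_refl _) (le_refl _) x,
        beq_iff_eq, PySem.Int.mod_eq_zero_iff_dvd]
    constructor
    · rintro ⟨⟨h1, h2⟩, hdvd⟩
      refine ⟨hdvd, ?_⟩
      by_cases hxx : x * x ≤ N
      · exact Or.inl ⟨h1, hxx⟩
      · exact Or.inr ⟨h1, by omega, by omega⟩
    · rintro ⟨hdvd, ⟨h1, hxx⟩ | ⟨h1, hNxx, hxN⟩⟩
      · have : x * 1 ≤ x * x := mul_le_mul_of_nonneg_left (by omega) (by omega)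
        exact ⟨⟨h1, by omega⟩, hdvd⟩
      · exact ⟨⟨h1, by omega⟩, hdvd⟩
  · exact ((PySem.List.pairwise_lt_pyRange_one 1 (N + 1)).filter _)

lemma divs_filter_eq (N : Int) :
    ((PySem.List.pyRange 1 (N + 1) 1).filter (fun k => PySem.Int.mod N k == 0)).filter
        (fun k => decide (2 * k ≤ N))
      = (PySem.List.pyRange 1 (PySem.Int.floordiv N 2 + 1) 1).filter
        (fun k => PySem.Int.mod N k == 0) := by
  apply List.eq_of_perm_of_sorted (le := (· < ·))
  · intro a b _ _ hab hba; omega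
  · exact (((PySem.List.pairwise_lt_pyRange_one 1 (N + 1)).filter _).filter _)
  · exact ((PySem.List.pairwise_lt_pyRange_one 1 (PySem.Int.floordiv N 2 + 1)).filter _)
  · rw [List.perm_ext_iff_of_nodup
      (List.Nodup.filter _ (List.Nodup.filter _
        ((PySem.List.pairwise_lt_pyRange_one 1 (N + 1)).imp ne_of_lt)))
      (List.Nodup.filter _
        ((PySem.List.pairwise_lt_pyRange_one 1 (PySem.Int.floordiv N 2 + 1)).imp ne_of_lt))]
    intro x
    rw [List.mem_filter, List.mem_filter, List.mem_filter,
        PySem.List.mem_pyRange_one, PySem.List.mem_pyRange_one]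
    have hhalf : x ≤ PySem.Int.floordiv N 2 ↔ x * 2 ≤ N :=
      PySem.Int.le_floordiv_iff_mul_le (by norm_num)
    constructor
    · rintro ⟨⟨⟨h1, h2⟩, hdvd⟩, h3⟩
      have h3' : 2 * x ≤ N := by simpa using h3
      refine ⟨⟨h1, ?_⟩, hdvd⟩
      have := hhalf.mpr (by omega)
      omega
    · rintro ⟨⟨h1, h2⟩, hdvd⟩
      have hx2 : x * 2 ≤ N := hhalf.mp (by omega)
      refine ⟨⟨⟨h1, by omega⟩, hdvd⟩, by simp; omega⟩

lemma solveFindB_eq (N K : Int) (cs : List Char) :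
    ∀ ks : List Int, solveFindB N K cs ks
      = pvFind (fun k => decide (2 * k ≤ N) && decide (periodCost cs N k ≤ K)) N ks := by
  intro ks
  induction ks with
  | nil => rfl
  | cons k ks ih =>
      rw [solveFindB, pvFind]
      by_cases h2 : 2 * k ≤ N
      · by_cases hc : periodCost cs N k ≤ K
        · simp [h2, hc]
        · simp [h2, hc, ih]
      · simp [h2, ih]

-- ===== VERDICT (by name: the statement is the Claim_ definition above) =====
theorem solve_spec : Claim_equal_solve := by
  intro N K S _ hpre
  unfold Spec_solve solve solve_alt
  have hN2 : ∀ k : Int, k ∈ PySem.List.pyRange 1 (PySem.Int.floordiv N 2 + 1) 1 → 2 ≤ N := by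
    intro k hk
    rcases PySem.List.mem_pyRange_one.mp hk with ⟨h1, h2⟩
    have := (PySem.Int.le_floordiv_iff_mul_le (a := N) (b := 2) (q := 1) (by norm_num)).mp (by omega)
    omega
  -- A's fold, rewritten with the closed per-divisor cost
  refine Eq.trans (PySem.List.foldl_congr_mem _ _
      (fun ans k => if (PySem.Int.mod N k == 0) && decide (cntSum S.toList N k ≤ K)
        then min k ans else ans) _ ?_) ?_
  · intro acc k hk
    rcases PySem.List.mem_pyRange_one.mp hk with ⟨h1, h2⟩
    have hN : 2 ≤ N := hN2 k hk
    dsimp only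
    by_cases hm : (PySem.Int.mod N k == 0) = true
    · rw [if_pos hm, cntA_eq S.toList N k (by omega) (by omega)]
      by_cases hc : cntSum S.toList N k ≤ K
      · simp [hm, hc]
      · simp [hm, hc]
    · simp [hm]
  · rw [foldl_min_eq_find _ _ _
      ((PySem.List.pairwise_lt_pyRange_one _ _).imp le_of_lt) ?bound]
    case bound =>
      intro k hk
      rcases PySem.List.mem_pyRange_one.mp hk with ⟨h1, h2⟩
      have hN : 2 ≤ N := hN2 k hk
      have hfl : PySem.Int.floordiv N 2 < N := by
        rw [PySem.Int.floordiv_lt_iff_lt_mul (by norm_num)]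
        omega
      omega
    rw [pvFind_filter (fun k => (PySem.Int.mod N k == 0))
        (fun k => decide (cntSum S.toList N k ≤ K)) N,
      solveFindB_eq, sorted_divs,
      pvFind_filter (fun k => decide (2 * k ≤ N))
        (fun k => decide (periodCost S.toList N k ≤ K)) N,
      divs_filter_eq]
    apply pvFind_congr
    intro k hk
    rcases List.mem_filter.mp hk with ⟨hkr, hkd⟩
    rcases PySem.List.mem_pyRange_one.mp hkr with ⟨h1, h2⟩
    have hN : 2 ≤ N := hN2 k hkr
    have hdvd : k ∣ N := by
      rw [beq_iff_eq, PySem.Int.mod_eq_zero_iff_dvd] at hkd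
      exact hkd
    have h2k : 2 * k ≤ N := by
      have := (PySem.Int.le_floordiv_iff_mul_le (a := N) (b := 2) (q := k) (by norm_num)).mp (by omega)
      omega
    have hlen : N ≤ (S.toList.length : Int) := by
      rcases hpre with h | h
      · omega
      · exact h
    rw [periodCost_eq S.toList N k (by omega) hdvd h2k hlen]
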